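-- pv_equiv track=rewrite | github.com/hjcdg1/baekjoon-ps-old | practice01_greedy/2875.py | MaxTeam
-- ===== SOURCE A (Python) =====
-- def MaxTeam(N, M, K) :
--     max_team = 0
--     for i in range(K+1) :
--         G = N - i
--         B = M - (K - i)
--         if (G >= 2*B) :
--             if (B > max_team) :
--                 max_team = B
--         else :
--             if (G // 2 > max_team) :
--                 max_team = G // 2
--     return max_team
-- ===== SOURCE B (Python) =====
-- def MaxTeam(N, M, K):
--     # closed form: teams capped by girls//2, by boys, and by total people after removing K
--     return max(0, min(N // 2, M, (N + M - K) // 3))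
-- ===== Notes on version B (the rewrite author's own statement) =====
-- stated objective: faster
-- what changed: Replaces the O(K) scan over all ways to split the K removals with the closed form max(0, min(N//2, M, (N+M-K)//3)).
-- outside the precondition, e.g. on MaxTeam(10, 10, -1): A returns 0, B returns 5
import Mathlib
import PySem

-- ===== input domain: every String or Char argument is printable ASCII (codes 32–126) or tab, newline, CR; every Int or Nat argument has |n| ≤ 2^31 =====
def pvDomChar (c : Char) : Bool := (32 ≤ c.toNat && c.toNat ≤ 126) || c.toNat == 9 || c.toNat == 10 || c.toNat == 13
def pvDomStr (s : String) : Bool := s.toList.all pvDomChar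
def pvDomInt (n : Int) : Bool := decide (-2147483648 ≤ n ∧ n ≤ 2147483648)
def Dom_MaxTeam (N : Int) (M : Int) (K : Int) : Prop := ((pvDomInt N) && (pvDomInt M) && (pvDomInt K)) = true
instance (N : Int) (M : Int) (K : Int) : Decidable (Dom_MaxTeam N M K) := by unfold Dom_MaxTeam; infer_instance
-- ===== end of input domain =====

-- B replaces A's O(K) scan over removal splits with the closed form max(0, min(N//2, M, (N+M-K)//3)).


-- ===== PORT A =====
def MaxTeam (N : Int) (M : Int) (K : Int) : Int :=
  (PySem.List.pyRange 0 (K + 1) 1).foldl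
    (fun max_team i =>
      let G := N - i
      let B := M - (K - i)
      if G ≥ 2 * B then
        if B > max_team then B else max_team
      else
        if PySem.Int.floordiv G 2 > max_team then PySem.Int.floordiv G 2 else max_team)
    0

-- ===== PORT B =====
def MaxTeam_alt (N : Int) (M : Int) (K : Int) : Int :=
  max 0 (min (PySem.Int.floordiv N 2) (min M (PySem.Int.floordiv (N + M - K) 3)))

-- ===== PRECONDITION & SPEC =====
-- Pre_ excludes only the out-of-domain inputs K < 0 on which the two disagree: there A's
-- loop over range(K+1) is empty and returns 0, while the closed form would be positive.
def Pre_MaxTeam (N : Int) (M : Int) (K : Int) : Prop :=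
  0 ≤ K ∨ min (PySem.Int.floordiv N 2) (min M (PySem.Int.floordiv (N + M - K) 3)) ≤ 0
instance (N : Int) (M : Int) (K : Int) : Decidable (Pre_MaxTeam N M K) := by unfold Pre_MaxTeam; infer_instance
def pvWitness_MaxTeam : Int × Int × Int := (10, 5, 3)
def Spec_MaxTeam (N : Int) (M : Int) (K : Int) (out : Int) : Prop := out = MaxTeam_alt N M K
instance (N : Int) (M : Int) (K : Int) (out : Int) : Decidable (Spec_MaxTeam N M K out) := by unfold Spec_MaxTeam; infer_instance

-- ===== CLAIM (what is proved, stated in full; the proofs are below) =====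
def Claim_equal_MaxTeam : Prop := ∀ (N : Int) (M : Int) (K : Int), Dom_MaxTeam N M K → Pre_MaxTeam N M K → Spec_MaxTeam N M K (MaxTeam N M K)

-- ===== LEMMAS AND PROOFS =====

-- A's loop body equals "take the max of the accumulator and min(B, G//2)".
theorem pv_step_eq (N M K mt i : Int) :
    (let G := N - i
     let B := M - (K - i)
     if G ≥ 2 * B then
       if B > mt then B else mt
     else
       if PySem.Int.floordiv G 2 > mt then PySem.Int.floordiv G 2 else mt)
    = max mt (min (M - (K - i)) (PySem.Int.floordiv (N - i) 2)) := by
  simp only []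
  have h2 : PySem.Int.floordiv (N - i) 2 = (N - i) / 2 :=
    PySem.Int.floordiv_eq_ediv_of_pos (by omega)
  rw [h2]
  split_ifs with h a b c <;> omega

-- folding max over a list: bounded above by any bound on the candidates
theorem pv_fold_le (c : Int → Int) (l : List Int) (m T : Int)
    (hm : m ≤ T) (hc : ∀ i ∈ l, c i ≤ T) :
    l.foldl (fun mt i => max mt (c i)) m ≤ T := by
  induction l generalizing m with
  | nil => simpa using hm
  | cons x xs ih =>
      simp only [List.foldl_cons]
      exact ih _ (by have := hc x (by simp); omega)
        (fun i hi => hc i (by simp [hi]))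

-- folding max over a list: at least the accumulator
theorem pv_fold_ge_acc (c : Int → Int) (l : List Int) (m : Int) :
    m ≤ l.foldl (fun mt i => max mt (c i)) m := by
  induction l generalizing m with
  | nil => simp
  | cons x xs ih =>
      simp only [List.foldl_cons]
      exact le_trans (le_max_left _ _) (ih _)

-- folding max over a list: at least any candidate that appears
theorem pv_fold_ge (c : Int → Int) (l : List Int) (i : Int) :
    ∀ m : Int, i ∈ l → c i ≤ l.foldl (fun mt i => max mt (c i)) m := by
  induction l with
  | nil => intro m h; simp at h
  | cons x xs ih =>
      intro m h
      simp only [List.foldl_cons]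
      rcases List.mem_cons.mp h with h | h
      · subst h
        exact le_trans (le_max_right _ _) (pv_fold_ge_acc c xs _)
      · exact ih _ h

-- ===== VERDICT (by name: the statement is the Claim_ definition above) =====
theorem MaxTeam_spec : Claim_equal_MaxTeam := by
  intro N M K _ hpre
  replace hpre : 0 ≤ K ∨ min (PySem.Int.floordiv N 2) (min M (PySem.Int.floordiv (N + M - K) 3)) ≤ 0 := hpre
  unfold Spec_MaxTeam MaxTeam MaxTeam_alt
  simp only [pv_step_eq]
  set c : Int → Int := fun i => min (M - (K - i)) (PySem.Int.floordiv (N - i) 2) with hc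
  have hN2 : PySem.Int.floordiv N 2 = N / 2 := PySem.Int.floordiv_eq_ediv_of_pos (by omega)
  have h3 : PySem.Int.floordiv (N + M - K) 3 = (N + M - K) / 3 :=
    PySem.Int.floordiv_eq_ediv_of_pos (by omega)
  set T : Int := min (PySem.Int.floordiv N 2) (min M (PySem.Int.floordiv (N + M - K) 3)) with hT
  by_cases hK : (0:Int) ≤ K
  case neg =>
    have hT0 : T ≤ 0 := by omega
    rw [PySem.List.pyRange_one_eq_nil (by omega : K + 1 ≤ (0:Int))]
    simp only [List.foldl_nil]
    omega
  have hub : ∀ i ∈ PySem.List.pyRange 0 (K + 1) 1, c i ≤ T := by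
    intro i hi
    rw [PySem.List.mem_pyRange_one] at hi
    have hdi : PySem.Int.floordiv (N - i) 2 = (N - i) / 2 :=
      PySem.Int.floordiv_eq_ediv_of_pos (by omega)
    rw [hT, hN2, h3, hc]
    simp only [hdi]
    omega
  have hle : (PySem.List.pyRange 0 (K + 1) 1).foldl (fun mt i => max mt (c i)) 0 ≤ max 0 T :=
    pv_fold_le c _ 0 (max 0 T) (le_max_left _ _)
      (fun i hi => le_trans (hub i hi) (le_max_right _ _))
  have hge : max 0 T ≤ (PySem.List.pyRange 0 (K + 1) 1).foldl (fun mt i => max mt (c i)) 0 := by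
    by_cases h0 : T ≤ 0
    · calc max 0 T ≤ 0 := by omega
        _ ≤ _ := pv_fold_ge_acc c _ 0
    · -- the witness index i* = max 0 (T - (M - K)) realises at least T
      set i : Int := max 0 (T - (M - K)) with hi
      have hmem : i ∈ PySem.List.pyRange 0 (K + 1) 1 := by
        rw [PySem.List.mem_pyRange_one]
        rw [hT, hN2, h3] at hi
        omega
      have hci : T ≤ c i := by
        have hdi : PySem.Int.floordiv (N - i) 2 = (N - i) / 2 :=
          PySem.Int.floordiv_eq_ediv_of_pos (by omega)
        rw [hc]
        simp only [hdi]
        rw [hT, hN2, h3] at hi ⊢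
        omega
      calc max 0 T ≤ T := by omega
        _ ≤ c i := hci
        _ ≤ _ := pv_fold_ge c _ i 0 hmem
  simp only [hc] at hle hge
  omega
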